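-- pv_equiv track=rewrite | github.com/bangtugu/Algorithm | PROGRAMMERS/불량_사용자.py | calc
-- ===== SOURCE A (Python) =====
-- def calc(n, lst, check):
--     if n >= len(lst):
--         string = ''
--         for i in range(len(check)):
--             string += str(check[i])
--         return [string]
--
--     str_lst = []
--
--     for number in lst[n]:
--         if check[number]: continue
--         check[number] = 1
--         str_lst.extend(calc(n+1, lst, check))
--         check[number] = 0
--
--     return str_lst
-- ===== SOURCE B (Python) =====
-- def calc(n, lst, check):
--     # Iterative level-by-level enumeration: each state is a copy of the check
--     # array with the positions chosen so far set to 1; every remaining list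
--     # extends every state by each of its usable numbers.
--     states = [check[:]]
--     for i in range(n, len(lst)):
--         next_states = []
--         for s in states:
--             for x in lst[i]:
--                 if not s[x]:
--                     t = s[:]
--                     t[x] = 1
--                     next_states.append(t)
--         states = next_states
--     return [''.join(map(str, s)) for s in states]
-- ===== Notes on version B (the rewrite author's own statement) =====
-- stated objective: alternative
-- what changed: Replaces the mutating depth-first recursion with an iterative level-by-level enumeration that grows a list of copied check-state arrays and renders each finished state to a string; check is never mutated.
-- outside the precondition, e.g. on calc(0, [[0], [7]], [1, 1]): A returns [], B returns []
import Mathlib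
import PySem

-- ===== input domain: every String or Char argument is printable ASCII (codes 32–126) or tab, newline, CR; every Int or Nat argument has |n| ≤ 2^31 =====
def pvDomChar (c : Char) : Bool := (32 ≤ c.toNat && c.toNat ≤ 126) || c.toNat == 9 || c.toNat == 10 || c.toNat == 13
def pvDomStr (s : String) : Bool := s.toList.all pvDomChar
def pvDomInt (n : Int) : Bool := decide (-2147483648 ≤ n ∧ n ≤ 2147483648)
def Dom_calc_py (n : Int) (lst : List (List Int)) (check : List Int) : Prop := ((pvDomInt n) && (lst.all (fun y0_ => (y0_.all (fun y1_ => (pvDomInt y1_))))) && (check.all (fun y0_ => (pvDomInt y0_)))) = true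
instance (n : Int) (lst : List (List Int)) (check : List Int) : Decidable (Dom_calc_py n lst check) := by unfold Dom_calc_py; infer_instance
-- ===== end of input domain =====

-- B replaces A's mutating depth-first recursion by an iterative level-by-level
-- enumeration of copied check-state arrays (objective: alternative).

-- ===== PORT A =====
-- "for i in range(len(check)): string += str(check[i])"
def pvStrOfCheck (check : List Int) : String :=
  String.ofList ((List.range check.length).foldl (fun s i => s ++ PySem.Int.toChars (check.getD i 0)) [])

-- the recursion "calc(n, ...)" descends ((len(lst) - n).toNat) levels; that gas
-- is 0 exactly when "n >= len(lst)" (the base case), so the code is unchanged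
def calc_py_go : Nat → Int → List (List Int) → List Int → List String
  | 0, _n, _lst, check => [pvStrOfCheck check]          -- "if n >= len(lst): return [string]"
  | k + 1, n, lst, check =>
    match PySem.List.pyGet? lst n with
    | none => []          -- lst[n] raises IndexError here (outside Pre_)
    | some row =>
      -- "for number in lst[n]: ... str_lst.extend(calc(n+1, lst, check)) ..."
      row.foldl (fun acc number =>
        match PySem.List.pyGet? check number with
        | none => acc          -- check[number] raises IndexError here (outside Pre_)
        | some v =>
          if v ≠ 0 then acc
          else acc ++ calc_py_go k (n + 1) lst (PySem.List.pySetD check number 1)) []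

def calc_py (n : Int) (lst : List (List Int)) (check : List Int) : List String :=
  calc_py_go (PySem.List.len lst - n).toNat n lst check

-- ===== PORT B =====
-- "if not s[x]" (s[x] raises IndexError outside Pre_)
def pvOk (s : List Int) (x : Int) : Bool := (PySem.List.pyGet? s x).getD 1 == 0

-- "''.join(map(str, s))"
def pvRenderState (s : List Int) : String := String.ofList (s.flatMap PySem.Int.toChars)

def calc_py_alt (n : Int) (lst : List (List Int)) (check : List Int) : List String :=
  let states := ((PySem.List.pyRange n (PySem.List.len lst) 1).map
      (fun i => (PySem.List.pyGet? lst i).getD [])).foldl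
    (fun states row => states.flatMap
      (fun s => (row.filter (pvOk s)).map (fun x => PySem.List.pySetD s x 1))) [check]
  states.map pvRenderState

-- ===== PRECONDITION & SPEC =====
-- Pre_ admits the inputs on which A's search stays in range: n ≥ -len(lst) (a smaller n
-- makes lst[n] raise IndexError at once) and every entry of every row the search can
-- visit (lst[n:] for n ≥ 0, all of lst for negative n, which Python wraps) a valid
-- check index in [-len(check), len(check)).  This is slightly narrower than A's exact
-- domain: an out-of-range entry in a visited row is harmless to A when every earlier
-- level was blocked, and there A and B both return the same [] anyway (see cites).
def Pre_calc_py (n : Int) (lst : List (List Int)) (check : List Int) : Prop :=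
  -(lst.length : Int) ≤ n ∧
    ∀ row ∈ (if 0 ≤ n then lst.drop n.toNat else lst), ∀ x ∈ row,
      -(check.length : Int) ≤ x ∧ x < (check.length : Int)
instance (n : Int) (lst : List (List Int)) (check : List Int) : Decidable (Pre_calc_py n lst check) := by unfold Pre_calc_py; infer_instance

def pvWitness_calc_py : Int × List (List Int) × List Int := (0, [[0, 1], [0, 2]], [0, 0, 0])

def Spec_calc_py (n : Int) (lst : List (List Int)) (check : List Int) (out : List String) : Prop := out = calc_py_alt n lst check
instance (n : Int) (lst : List (List Int)) (check : List Int) (out : List String) : Decidable (Spec_calc_py n lst check out) := by unfold Spec_calc_py; infer_instance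

-- ===== CLAIM (what is proved, stated in full; the proofs are below) =====
def Claim_equal_calc_py : Prop := ∀ (n : Int) (lst : List (List Int)) (check : List Int), Dom_calc_py n lst check → Pre_calc_py n lst check → Spec_calc_py n lst check (calc_py n lst check)

-- ===== LEMMAS AND PROOFS =====

-- the rows the search visits, in order (B's "lst[i] for i in range(n, len(lst))")
def pvRows (n : Int) (lst : List (List Int)) : List (List Int) :=
  (PySem.List.pyRange n (PySem.List.len lst) 1).map (fun i => (PySem.List.pyGet? lst i).getD [])

-- all states produced by extending s through the remaining rows
def pvG : List (List Int) → List Int → List (List Int)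
  | [], s => [s]
  | row :: rows, s =>
    (row.filter (pvOk s)).flatMap (fun x => pvG rows (PySem.List.pySetD s x 1))

lemma pvGetSome {α : Type} (xs : List α) (i : Int)
    (h1 : -(xs.length : Int) ≤ i) (h2 : i < (xs.length : Int)) :
    ∃ v, PySem.List.pyGet? xs i = some v := by
  cases h : PySem.List.pyGet? xs i with
  | none =>
    rw [PySem.List.pyGet?_eq_none_iff] at h
    exact absurd ⟨h1, h2⟩ h
  | some v => exact ⟨v, rfl⟩

lemma pvFoldB (rows : List (List Int)) :
    ∀ cs : List (List Int),
      rows.foldl (fun states row => states.flatMap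
          (fun s => (row.filter (pvOk s)).map (fun x => PySem.List.pySetD s x 1))) cs
        = cs.flatMap (pvG rows) := by
  intro cs
  induction rows generalizing cs with
  | nil => simp [pvG]
  | cons row rows ih =>
    rw [List.foldl_cons, ih, List.flatMap_assoc]
    refine List.flatMap_congr (fun c _ => ?_)
    rw [List.flatMap_map]
    rfl

lemma pvFlatMapRangeGetD (s : List Int) (f : Int → List Char) :
    (List.range s.length).flatMap (fun i => f (s.getD i 0)) = s.flatMap f := by
  induction s using List.reverseRecOn with
  | nil => simp
  | append_singleton s x ih =>
    rw [List.length_append, List.length_cons, List.length_nil, Nat.add_zero,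
        List.range_succ, List.flatMap_append, List.flatMap_append]
    congr 1
    · rw [← ih]
      refine List.flatMap_congr (fun i hi => ?_)
      have : i < s.length := List.mem_range.mp hi
      simp [List.getD, List.getElem?_append_left this]
    · simp [List.getD]

lemma pvStrEq (s : List Int) : pvStrOfCheck s = pvRenderState s := by
  unfold pvStrOfCheck pvRenderState
  rw [PySem.List.foldl_append_eq_flatMap (fun i => PySem.Int.toChars (s.getD i 0)),
      List.nil_append, pvFlatMapRangeGetD s PySem.Int.toChars]

lemma pvRows_nil (n : Int) (lst : List (List Int)) (h : (lst.length : Int) ≤ n) :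
    pvRows n lst = [] := by
  unfold pvRows
  rw [show PySem.List.pyRange n (PySem.List.len lst) 1 = [] by
    simp [PySem.List.pyRange, PySem.List.len_eq]; omega]
  rfl

lemma pvRows_cons (n : Int) (lst : List (List Int))
    (h2 : n < (lst.length : Int)) :
    pvRows n lst
      = ((PySem.List.pyGet? lst n).getD []) :: pvRows (n + 1) lst := by
  unfold pvRows
  rw [show PySem.List.pyRange n (PySem.List.len lst) 1
        = n :: PySem.List.pyRange (n + 1) (PySem.List.len lst) 1 from
      PySem.List.pyRange_one_cons (by simp [PySem.List.len_eq]; omega),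
    List.map_cons]

lemma pvMain (lst : List (List Int)) (m : Nat) :
    ∀ (k : Nat) (n : Int) (s : List Int),
      ((lst.length : Int) - n).toNat = k → -(lst.length : Int) ≤ n →
      s.length = m →
      (∀ row ∈ pvRows n lst, ∀ x ∈ row, -(m : Int) ≤ x ∧ x < (m : Int)) →
      calc_py_go k n lst s = (pvG (pvRows n lst) s).map pvStrOfCheck := by
  intro k
  induction k with
  | zero =>
    intro n s hk hn hL hv
    have hm : (lst.length : Int) ≤ n := by omega
    rw [calc_py_go, pvRows_nil n lst hm]
    simp [pvG]
  | succ k ih =>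
    intro n s hk hn hL hv
    have hm : n < (lst.length : Int) := by omega
    obtain ⟨row, hget⟩ := pvGetSome lst n (by omega) hm
    rw [calc_py_go, hget]
    have hcons : pvRows n lst = row :: pvRows (n + 1) lst := by
      rw [pvRows_cons n lst hm, hget, Option.getD_some]
    have hrow : ∀ x ∈ row, -(m : Int) ≤ x ∧ x < (m : Int) :=
      fun x hx => hv row (by rw [hcons]; exact List.mem_cons_self) x hx
    have hvtail : ∀ r ∈ pvRows (n + 1) lst, ∀ x ∈ r, -(m : Int) ≤ x ∧ x < (m : Int) :=
      fun r hr => hv r (by rw [hcons]; exact List.mem_cons_of_mem _ hr)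
    have inner : ∀ (row' : List Int),
        (∀ x ∈ row', -(m : Int) ≤ x ∧ x < (m : Int)) → ∀ acc,
        row'.foldl (fun acc number =>
            match PySem.List.pyGet? s number with
            | none => acc
            | some v =>
              if v ≠ 0 then acc
              else acc ++ calc_py_go k (n + 1) lst (PySem.List.pySetD s number 1)) acc
          = acc ++ (row'.filter (pvOk s)).flatMap
              (fun x => (pvG (pvRows (n + 1) lst) (PySem.List.pySetD s x 1)).map pvStrOfCheck) := by
      intro row'
      induction row' with
      | nil => intro _ acc; simp
      | cons x rest ihr =>
        intro hxs acc
        obtain ⟨hxlo, hxhi⟩ := hxs x List.mem_cons_self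
        have hrest := fun y hy => hxs y (List.mem_cons_of_mem _ hy)
        obtain ⟨v, hgx⟩ := pvGetSome s x (by omega) (by omega)
        have hok : pvOk s x = (v == 0) := by simp [pvOk, hgx]
        rw [List.foldl_cons]
        by_cases hv0 : v = 0
        · have hrec := ih (n + 1) (PySem.List.pySetD s x 1) (by omega) (by omega)
            (by rw [PySem.List.length_pySetD]; exact hL) hvtail
          rw [show (match PySem.List.pyGet? s x with
                | none => acc
                | some v =>
                  if v ≠ 0 then acc
                  else acc ++ calc_py_go k (n + 1) lst (PySem.List.pySetD s x 1))
              = acc ++ calc_py_go k (n + 1) lst (PySem.List.pySetD s x 1) from by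
            rw [hgx]; simp [hv0]]
          rw [ihr hrest, hrec,
              List.filter_cons_of_pos (by simp [hok, hv0]), List.flatMap_cons,
              List.append_assoc]
        · rw [show (match PySem.List.pyGet? s x with
                | none => acc
                | some v =>
                  if v ≠ 0 then acc
                  else acc ++ calc_py_go k (n + 1) lst (PySem.List.pySetD s x 1)) = acc from by
            rw [hgx]; simp [hv0]]
          rw [ihr hrest, List.filter_cons_of_neg (by simp [hok, hv0])]
    show row.foldl (fun acc number =>
        match PySem.List.pyGet? s number with
        | none => acc
        | some v =>
          if v ≠ 0 then acc
          else acc ++ calc_py_go k (n + 1) lst (PySem.List.pySetD s number 1)) []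
      = (pvG (pvRows n lst) s).map pvStrOfCheck
    rw [inner row hrow [], hcons]
    simp [pvG, List.map_flatMap]

lemma pvPreRows (n : Int) (lst : List (List Int)) (check : List Int)
    (hn : -(lst.length : Int) ≤ n)
    (hv : ∀ row ∈ (if 0 ≤ n then lst.drop n.toNat else lst), ∀ x ∈ row,
      -(check.length : Int) ≤ x ∧ x < (check.length : Int)) :
    ∀ row ∈ pvRows n lst, ∀ x ∈ row,
      -(check.length : Int) ≤ x ∧ x < (check.length : Int) := by
  intro row hrow
  obtain ⟨i, hi, hrw⟩ := List.mem_map.mp hrow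
  have hib : n ≤ i ∧ i < (lst.length : Int) := by
    have := (PySem.List.mem_pyRange_one (a := n) (b := PySem.List.len lst) (x := i)).mp hi
    simp only [PySem.List.len_eq] at this
    omega
  obtain ⟨r, hget⟩ := pvGetSome lst i (by omega) hib.2
  have hrow' : row = r := by rw [← hrw, hget, Option.getD_some]
  by_cases hn0 : 0 ≤ n
  · -- the visited row lies in lst.drop n.toNat
    have hi0 : 0 ≤ i := by omega
    have hgi : PySem.List.pyGet? lst i = some lst[i.toNat] :=
      PySem.List.pyGet?_eq_some_getElem lst hi0 hib.2
    have hmem : row ∈ lst.drop n.toNat := by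
      refine List.mem_iff_getElem.mpr ⟨i.toNat - n.toNat, by simp; omega, ?_⟩
      rw [hrow', show r = lst[i.toNat] from by
            have := hget.symm.trans hgi; exact Option.some_injective _ this,
          List.getElem_drop]
      exact getElem_congr rfl (by omega) (by omega)
    exact hv row (by rwa [if_pos hn0])
  · have hmem : row ∈ lst := by
      rw [hrow']; exact PySem.List.mem_of_pyGet?_eq_some _ hget
    exact hv row (by rwa [if_neg hn0])

-- ===== VERDICT (by name: the statement is the Claim_ definition above) =====
theorem calc_py_spec : Claim_equal_calc_py := by
  intro n lst check _hdom hpre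
  obtain ⟨hn, hv⟩ := hpre
  unfold Spec_calc_py calc_py_alt
  rw [show ((PySem.List.pyRange n (PySem.List.len lst) 1).map
        (fun i => (PySem.List.pyGet? lst i).getD [])) = pvRows n lst from rfl,
      pvFoldB]
  have hmain := pvMain lst check.length ((lst.length : Int) - n).toNat n check rfl hn rfl
    (pvPreRows n lst check hn hv)
  show calc_py_go ((PySem.List.len lst : Int) - n).toNat n lst check
      = ([check].flatMap (pvG (pvRows n lst))).map pvRenderState
  rw [List.flatMap_cons, List.flatMap_nil, List.append_nil, PySem.List.len_eq, hmain]
  exact List.map_congr_left (fun s _ => pvStrEq s)
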